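-- pv_equiv track=rewrite | github.com/million-t/competitive-programming | 2358-maximum-number-of-groups-entering-a-competition/2358-maximum-number-of-groups-entering-a-competition.py | maximumGroups
-- ===== SOURCE A (Python) =====
-- from typing import List
--
-- def maximumGroups(grades: List[int]) -> int:
--
--     grades.sort()
--     _set = 0
--     cur = 1
--
--     while _set + cur <= len(grades):
--         _set += cur
--         cur += 1
--
--     return cur - 1
-- ===== SOURCE B (Python) =====
-- def maximumGroups(grades):
--     # Binary search for the largest k with k*(k+1)//2 <= len(grades); no sort needed
--     # (the answer depends only on the length). Unlike A, does not mutate `grades`.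
--     n = len(grades)
--     lo, hi = 0, n
--     while lo < hi:
--         mid = (lo + hi + 1) // 2
--         if mid * (mid + 1) // 2 <= n:
--             lo = mid
--         else:
--             hi = mid - 1
--     return lo
-- ===== Notes on version B (the rewrite author's own statement) =====
-- stated objective: alternative
-- what changed: A sorts the list (pointlessly for the result) and counts groups one by one in a linear loop; B drops the sort and binary-searches the largest k with k(k+1)/2 <= len(grades), and does not mutate the input list.
import Mathlib
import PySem

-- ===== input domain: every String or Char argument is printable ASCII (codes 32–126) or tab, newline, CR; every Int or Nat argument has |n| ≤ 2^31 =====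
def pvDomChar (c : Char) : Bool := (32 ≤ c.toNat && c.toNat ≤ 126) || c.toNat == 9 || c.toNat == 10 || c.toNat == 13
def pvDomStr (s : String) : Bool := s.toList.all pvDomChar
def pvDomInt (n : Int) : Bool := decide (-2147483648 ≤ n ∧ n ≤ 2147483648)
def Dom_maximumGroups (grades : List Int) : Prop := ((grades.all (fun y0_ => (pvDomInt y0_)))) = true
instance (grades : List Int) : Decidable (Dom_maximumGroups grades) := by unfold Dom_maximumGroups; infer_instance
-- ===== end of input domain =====

-- B replaces A's sort + one-by-one counting loop with a binary search for the largest k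
-- with k(k+1)/2 ≤ len(grades); equivalence is about the RETURN value only (A sorts its
-- argument in place, B does not mutate it).

-- ===== PORT A =====
-- while _set + cur <= len(grades): _set += cur; cur += 1   (returns cur - 1)
def pyLoopA (n _set cur : Int) : Int :=
  if _set + cur ≤ n then pyLoopA n (_set + cur) (cur + 1) else cur - 1
termination_by ((1 - cur).toNat, (n + 1 - _set).toNat)
decreasing_by
  by_cases h : cur ≤ 0
  · exact Prod.Lex.left _ _ (by omega)
  · push Not at h
    have h1 : (1 - (cur + 1)).toNat = (1 - cur).toNat := by omega
    rw [h1]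
    exact Prod.Lex.right _ (by omega)

def maximumGroups (grades : List Int) : Int :=
  let g := PySem.List.sorted grades (fun x => x) false   -- grades.sort()
  pyLoopA (g.length : Int) 0 1

-- ===== PORT B =====
def bsLoopB (n lo hi : Int) : Int :=
  if lo < hi then
    let mid := PySem.Int.floordiv (lo + hi + 1) 2
    if PySem.Int.floordiv (mid * (mid + 1)) 2 ≤ n then bsLoopB n mid hi
    else bsLoopB n lo (mid - 1)
  else lo
termination_by (hi - lo).toNat
decreasing_by
  · have := PySem.Int.floordiv_eq_iff_of_pos (a := lo + hi + 1) (b := 2)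
      (q := PySem.Int.floordiv (lo + hi + 1) 2) (by omega)
    omega
  · have := PySem.Int.floordiv_eq_iff_of_pos (a := lo + hi + 1) (b := 2)
      (q := PySem.Int.floordiv (lo + hi + 1) 2) (by omega)
    omega

def maximumGroups_alt (grades : List Int) : Int :=
  bsLoopB (grades.length : Int) 0 (grades.length : Int)

-- ===== PRECONDITION & SPEC =====
def Spec_maximumGroups (grades : List Int) (out : Int) : Prop := out = maximumGroups_alt grades
instance (grades : List Int) (out : Int) : Decidable (Spec_maximumGroups grades out) := by unfold Spec_maximumGroups; infer_instance

-- ===== CLAIM (what is proved, stated in full; the proofs are below) =====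
def Claim_equal_maximumGroups : Prop := ∀ (grades : List Int), Dom_maximumGroups grades → Spec_maximumGroups grades (maximumGroups grades)

-- ===== LEMMAS AND PROOFS =====

-- The answer predicate: r is the largest k ≥ 0 with k(k+1) ≤ 2n.
def IsAns (n r : Int) : Prop := 0 ≤ r ∧ r * (r + 1) ≤ 2 * n ∧ 2 * n < (r + 1) * (r + 2)

lemma exists_ans (n : Int) (hn : 0 ≤ n) : ∃ r, IsAns n r := by
  induction n, hn using Int.le_induction with
  | base => exact ⟨0, by norm_num [IsAns]⟩
  | succ m hm ih =>
    obtain ⟨r, hr0, hr1, hr2⟩ := ih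
    by_cases h : (r + 1) * (r + 2) ≤ 2 * (m + 1)
    · exact ⟨r + 1, by omega, by linarith, by nlinarith⟩
    · exact ⟨r, hr0, by omega, by omega⟩

lemma pyLoopA_eq (n r : Int) (h : IsAns n r) :
    ∀ (k : Nat) (c s : Int), c = r + 1 - (k : Int) → 1 ≤ c → 2 * s = c * (c - 1) →
      pyLoopA n s c = r := by
  obtain ⟨hr0, hr1, hr2⟩ := h
  intro k
  induction k with
  | zero =>
    intro c s hc h1 hs
    rw [pyLoopA]
    have hcr : c = r + 1 := by omega
    have : ¬ (s + c ≤ n) := by subst hcr; nlinarith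
    simp [this]
    omega
  | succ m ih =>
    intro c s hc h1 hs
    rw [pyLoopA]
    have hcr : c ≤ r := by omega
    have hcond : s + c ≤ n := by nlinarith
    simp only [hcond, if_pos]
    exact ih (c + 1) (s + c) (by push_cast at hc ⊢; omega) (by omega) (by ring_nf; nlinarith [hs])

lemma bsLoopB_eq (n r : Int) (h : IsAns n r) :
    ∀ (k : Nat) (lo hi : Int), hi - lo = (k : Int) → 0 ≤ lo → lo ≤ r → r ≤ hi →
      bsLoopB n lo hi = r := by
  obtain ⟨hr0, hr1, hr2⟩ := h
  intro k
  induction k using Nat.strong_induction_on with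
  | _ k ih =>
    intro lo hi hk h0lo hlo hhi
    rw [bsLoopB]
    by_cases hlt : lo < hi
    · simp only [hlt, if_pos]
      set mid := PySem.Int.floordiv (lo + hi + 1) 2 with hmid
      have hmb : mid * 2 ≤ lo + hi + 1 ∧ lo + hi + 1 < (mid + 1) * 2 :=
        (PySem.Int.floordiv_eq_iff_of_pos (by omega)).mp rfl
      have hmlo : lo < mid := by omega
      have hmhi : mid ≤ hi := by omega
      obtain ⟨t, ht⟩ := Int.even_mul_succ_self mid
      have hfd : PySem.Int.floordiv (mid * (mid + 1)) 2 = t := by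
        rw [ht, PySem.Int.floordiv_eq_iff_of_pos (by omega)]; omega
      by_cases hc : PySem.Int.floordiv (mid * (mid + 1)) 2 ≤ n
      · simp only [hc, if_pos]
        -- T(mid) ≤ n, hence mid ≤ r
        have h2t : mid * (mid + 1) ≤ 2 * n := by rw [ht]; omega
        -- binary-search step: T(mid) ≤ n keeps mid ≤ r
        have hmr : mid ≤ r := by
          by_contra hcon
          push Not at hcon
          nlinarith [mul_nonneg (show (0:Int) ≤ mid - (r + 1) by omega)
            (show (0:Int) ≤ mid + (r + 2) by omega)]
        exact ih (hi - mid).toNat (by omega) mid hi (by omega) (by omega) hmr hhi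
      · simp only [hc, ite_false]
        -- T(mid) > n, hence r ≤ mid - 1
        have h2t : 2 * n < mid * (mid + 1) := by rw [ht]; omega
        have hmr : r ≤ mid - 1 := by
          by_contra hcon
          push Not at hcon
          nlinarith [mul_nonneg (show (0:Int) ≤ r - mid by omega)
            (show (0:Int) ≤ r + mid + 1 by omega)]
        exact ih (mid - 1 - lo).toNat (by omega) lo (mid - 1) (by omega) h0lo hlo hmr
    · simp only [hlt, ite_false]
      omega

-- ===== VERDICT (by name: the statement is the Claim_ definition above) =====
theorem maximumGroups_spec : Claim_equal_maximumGroups := by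
  intro grades _
  unfold Spec_maximumGroups maximumGroups maximumGroups_alt
  show pyLoopA ((PySem.List.sorted grades (fun x => x) false).length : Int) 0 1 =
    bsLoopB (grades.length : Int) 0 (grades.length : Int)
  rw [PySem.List.length_sorted]
  set n : Int := (grades.length : Int) with hn
  have hn0 : 0 ≤ n := by positivity
  obtain ⟨r, hr0, hr1, hr2⟩ := exists_ans n hn0
  have hrn : r ≤ n := by nlinarith
  rw [pyLoopA_eq n r ⟨hr0, hr1, hr2⟩ r.toNat 1 0 (by omega) (by omega) (by ring),
      bsLoopB_eq n r ⟨hr0, hr1, hr2⟩ n.toNat 0 n (by omega) le_rfl hr0 hrn]
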